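-- pv_equiv track=rewrite | github.com/saultyevil/slashbot | slashbot/core/logger.py | _extract_latest_error_block
-- ===== SOURCE A (Python) =====
-- def _extract_latest_error_block(lines: list[str]) -> list[str]:
--     for i in range(len(lines) - 1, -1, -1):
--         if "ERROR" in lines[i]:
--             block = [lines[i]]
--             for j in range(i + 1, len(lines)):
--                 if any(level_name in lines[j] for level_name in ("ERROR", "INFO", "WARNING")):
--                     break
--                 block.append(lines[j])
--             return block
--     return []
-- ===== SOURCE B (Python) =====
-- def _extract_latest_error_block(lines: list[str]) -> list[str]:
--     result = []
--     current = None
--     current_is_error = False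
--     for line in lines:
--         if any(name in line for name in ("ERROR", "INFO", "WARNING")):
--             if current_is_error:
--                 result = current
--             current = [line]
--             current_is_error = "ERROR" in line
--         elif current is not None:
--             current.append(line)
--     return current if current_is_error else result
-- ===== Notes on version B (the rewrite author's own statement) =====
-- stated objective: alternative
-- what changed: A scans backwards for the last ERROR line and then re-scans forward to collect its block; B is a single forward pass that segments the log on marker lines, keeping the block opened by the most recent ERROR line.
import Mathlib
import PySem

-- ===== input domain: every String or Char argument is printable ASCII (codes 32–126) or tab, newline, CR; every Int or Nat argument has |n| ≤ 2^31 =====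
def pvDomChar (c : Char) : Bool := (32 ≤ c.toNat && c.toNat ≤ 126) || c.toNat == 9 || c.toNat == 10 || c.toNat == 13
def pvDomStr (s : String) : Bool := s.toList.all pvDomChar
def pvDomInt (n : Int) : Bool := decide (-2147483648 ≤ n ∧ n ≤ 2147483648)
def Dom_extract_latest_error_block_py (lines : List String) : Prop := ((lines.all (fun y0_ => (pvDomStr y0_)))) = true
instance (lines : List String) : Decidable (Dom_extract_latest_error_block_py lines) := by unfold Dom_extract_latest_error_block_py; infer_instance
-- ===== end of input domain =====

-- B replaces A's backward-search-then-forward-collect with one forward scan that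
-- segments the log on marker lines and remembers the block opened by the last ERROR
-- line (objective: alternative single-pass decomposition, same asymptotic cost).

-- ===== PORT A =====
-- "ERROR" in s
def pvErr (s : String) : Bool := PySem.Str.isIn "ERROR" s

-- any(level_name in s for level_name in ("ERROR", "INFO", "WARNING"))
def pvMarker (s : String) : Bool :=
  pvErr s || PySem.Str.isIn "INFO" s || PySem.Str.isIn "WARNING" s

-- inner loop: for j in range(i+1, len(lines)): break on marker, else append lines[j]
def pvCollect (lines : List String) (j : Nat) : List String :=
  if h : j < lines.length then
    if pvMarker lines[j] then []
    else lines[j] :: pvCollect lines (j + 1)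
  else []
termination_by lines.length - j

-- outer loop: for i in range(len(lines)-1, -1, -1): the argument counts how many
-- indices 0..i-1 remain to check, checking the highest first
def pvSearch (lines : List String) : Nat → List String
  | 0 => []
  | i + 1 =>
    if h : i < lines.length then
      if pvErr lines[i] then lines[i] :: pvCollect lines (i + 1)
      else pvSearch lines i
    else pvSearch lines i

def extract_latest_error_block_py (lines : List String) : List String :=
  pvSearch lines lines.length

-- ===== PORT B =====
-- one step of B's forward loop; state = (result, current, current_is_error);
-- Python's list aliasing (result = current) is modelled by the Bool flag:
-- the returned value is `current` exactly while current_is_error holds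
def pvStep (st : List String × Option (List String) × Bool) (line : String) :
    List String × Option (List String) × Bool :=
  if pvMarker line then
    ((if st.2.2 then st.2.1.getD [] else st.1), some [line], pvErr line)
  else
    match st.2.1 with
    | none => st
    | some cur => (st.1, some (cur ++ [line]), st.2.2)

def extract_latest_error_block_py_alt (lines : List String) : List String :=
  let st := lines.foldl pvStep ([], none, false)
  if st.2.2 then st.2.1.getD [] else st.1

-- ===== PRECONDITION & SPEC =====
def Spec_extract_latest_error_block_py (lines : List String) (out : List String) : Prop := out = extract_latest_error_block_py_alt lines
instance (lines : List String) (out : List String) : Decidable (Spec_extract_latest_error_block_py lines out) := by unfold Spec_extract_latest_error_block_py; infer_instance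

-- ===== CLAIM (what is proved, stated in full; the proofs are below) =====
def Claim_equal_extract_latest_error_block_py : Prop := ∀ (lines : List String), Dom_extract_latest_error_block_py lines → Spec_extract_latest_error_block_py lines (extract_latest_error_block_py lines)

-- ===== LEMMAS AND PROOFS =====

-- structural form of A's inner collect loop
def pvCollectL : List String → List String
  | [] => []
  | x :: xs => if pvMarker x then [] else x :: pvCollectL xs

-- structural form of A's backward search: rs = still-unsearched lines reversed,
-- acc = lines after the current search point, in order
def pvAR : List String → List String → List String
  | [], _ => []
  | x :: rs, acc => if pvErr x then x :: pvCollectL acc else pvAR rs (x :: acc)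

-- "the error block found in (rs reversed ++ acc) extends to the end"
def pvOpen : List String → List String → Bool
  | [], _ => false
  | x :: rs, acc => if pvErr x then acc.all (fun s => !pvMarker s) else pvOpen rs (x :: acc)

-- suffix starting at the last marker line (B's `current`)
def pvCr : List String → List String → Option (List String)
  | [], _ => none
  | x :: rs, acc => if pvMarker x then some (x :: acc) else pvCr rs (x :: acc)

def pvC (l : List String) : Option (List String) := pvCr l.reverse []

theorem pvErr_marker {s : String} (h : pvErr s = true) : pvMarker s = true := by
  simp [pvMarker, h]

theorem pvCollect_eq (lines : List String) (j : Nat) :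
    pvCollect lines j = pvCollectL (lines.drop j) := by
  fun_induction pvCollect lines j with
  | case1 j h hm => rw [List.drop_eq_getElem_cons h, pvCollectL]; simp [hm]
  | case2 j h hm ih => rw [List.drop_eq_getElem_cons h, pvCollectL]; simp [hm, ih]
  | case3 j h => rw [List.drop_eq_nil_of_le (by omega), pvCollectL]

theorem pvSearch_eq (lines : List String) (i : Nat) (hi : i ≤ lines.length) :
    pvSearch lines i = pvAR ((lines.take i).reverse) (lines.drop i) := by
  induction i with
  | zero => simp [pvSearch, pvAR]
  | succ i ih =>
    have h : i < lines.length := by omega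
    have ht : (lines.take (i+1)).reverse = lines[i] :: (lines.take i).reverse := by
      rw [List.take_add_one]; simp [List.getElem?_eq_getElem h]
    rw [pvSearch, ht, pvAR, dif_pos h]
    by_cases he : pvErr lines[i] = true
    · rw [if_pos he, if_pos he, pvCollect_eq]
    · rw [if_neg he, if_neg he, ih (by omega), List.drop_eq_getElem_cons h]

theorem pvCollectL_append (u : List String) (x : String) :
    pvCollectL (u ++ [x]) =
      pvCollectL u ++ (if u.all (fun s => !pvMarker s) && !pvMarker x then [x] else []) := by
  induction u with
  | nil => by_cases h : pvMarker x <;> simp [pvCollectL, h]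
  | cons y u ih =>
    by_cases h : pvMarker y <;> simp [pvCollectL, h, ih]

theorem pvCr_acc (rs : List String) (acc t : List String) :
    pvCr rs (acc ++ t) = (pvCr rs acc).map (· ++ t) := by
  induction rs generalizing acc with
  | nil => simp [pvCr]
  | cons y rs ih =>
    by_cases h : pvMarker y
    · simp [pvCr, h]
    · simpa [pvCr, h] using ih (y :: acc)

theorem pvCr_none_all (rs : List String) (acc : List String) (h : pvCr rs acc = none) :
    rs.all (fun s => !pvMarker s) = true := by
  induction rs generalizing acc with
  | nil => rfl
  | cons y rs ih =>
    by_cases hm : pvMarker y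
    · simp [pvCr, hm] at h
    · rw [pvCr, if_neg hm] at h
      simp [hm, ih _ h]

theorem pvOpen_all_false (rs : List String) (acc : List String)
    (h : rs.all (fun s => !pvMarker s) = true) : pvOpen rs acc = false := by
  induction rs generalizing acc with
  | nil => rfl
  | cons y rs ih =>
    simp only [List.all_cons, Bool.and_eq_true] at h
    have hm : pvMarker y = false := by simpa using h.1
    have hy : ¬ pvErr y = true := by
      intro he; exact absurd (pvErr_marker he) (by simp [hm])
    rw [pvOpen, if_neg hy]
    exact ih _ h.2

theorem pvOpen_acc_marker (rs : List String) (acc : List String)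
    (h : ∃ a ∈ acc, pvMarker a = true) : pvOpen rs acc = false := by
  induction rs generalizing acc with
  | nil => rfl
  | cons y rs ih =>
    obtain ⟨a, ha, hma⟩ := h
    by_cases he : pvErr y
    · rw [pvOpen, if_pos he]
      exact List.all_eq_false.mpr ⟨a, ha, by simp [hma]⟩
    · rw [pvOpen, if_neg he]
      exact ih (y :: acc) ⟨a, List.mem_cons_of_mem _ ha, hma⟩

theorem pvOpen_acc_nonmarker (rs : List String) (x : String) (hx : pvMarker x = false)
    (acc : List String) : pvOpen rs (acc ++ [x]) = pvOpen rs acc := by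
  induction rs generalizing acc with
  | nil => rfl
  | cons y rs ih =>
    by_cases he : pvErr y
    · simp [pvOpen, he, hx]
    · rw [pvOpen, if_neg he, pvOpen, if_neg he]
      exact ih (y :: acc)

theorem pvAR_acc_nonmarker (x : String) (hx : pvMarker x = false) (rs : List String)
    (acc : List String) :
    pvAR rs (acc ++ [x]) =
      if pvOpen rs acc then pvAR rs acc ++ [x] else pvAR rs acc := by
  induction rs generalizing acc with
  | nil => simp [pvAR, pvOpen]
  | cons y rs ih =>
    by_cases he : pvErr y
    · rw [pvAR, if_pos he, pvAR, if_pos he, pvOpen, if_pos he, pvCollectL_append]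
      by_cases ha : acc.all (fun s => !pvMarker s) <;> simp [ha, hx]
    · rw [pvAR, if_neg he, pvAR, if_neg he, pvOpen, if_neg he]
      exact ih (y :: acc)

theorem pvAR_acc_marker (x : String) (hx : pvMarker x = true) (rs : List String)
    (acc : List String) : pvAR rs (acc ++ [x]) = pvAR rs acc := by
  induction rs generalizing acc with
  | nil => rfl
  | cons y rs ih =>
    by_cases he : pvErr y
    · rw [pvAR, if_pos he, pvAR, if_pos he, pvCollectL_append]
      simp [hx]
    · rw [pvAR, if_neg he, pvAR, if_neg he]
      exact ih (y :: acc)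

-- the whole-file invariant of B's fold
theorem pvInv (l : List String) :
    (l.foldl pvStep ([], none, false)).2.2 = pvOpen l.reverse [] ∧
    (l.foldl pvStep ([], none, false)).2.1 = pvC l ∧
    (if (l.foldl pvStep ([], none, false)).2.2 then
        ((l.foldl pvStep ([], none, false)).2.1).getD []
      else (l.foldl pvStep ([], none, false)).1) = pvAR l.reverse [] := by
  induction l using List.reverseRecOn with
  | nil => exact ⟨rfl, rfl, rfl⟩
  | append_singleton ys x ih =>
    obtain ⟨hf, hc, hout⟩ := ih
    rw [List.foldl_append, List.foldl_cons, List.foldl_nil]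
    set st := ys.foldl pvStep (([] : List String), (none : Option (List String)), false) with hst
    have hrev : (ys ++ [x]).reverse = x :: ys.reverse := by simp
    by_cases hm : pvMarker x = true
    · -- marker line: start a new current block
      have hstep : pvStep st x =
          ((if st.2.2 then st.2.1.getD [] else st.1), some [x], pvErr x) := by
        rw [pvStep, if_pos hm]
      rw [hstep]
      refine ⟨?_, ?_, ?_⟩
      · show pvErr x = _
        rw [hrev, pvOpen]
        by_cases he : pvErr x = true
        · simp [he]
        · rw [if_neg he, pvOpen_acc_marker ys.reverse [x] ⟨x, by simp, hm⟩]
          simpa using he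
      · show some [x] = _
        rw [pvC, hrev, pvCr, if_pos hm]
      · show (if pvErr x = true then (some [x]).getD [] else _) = _
        rw [hrev, pvAR]
        by_cases he : pvErr x = true
        · rw [if_pos he, if_pos he, Option.getD_some, pvCollectL]
        · rw [if_neg he, if_neg he,
            show ([x] : List String) = [] ++ [x] from rfl, pvAR_acc_marker x hm]
          exact hout
    · -- non-marker line
      have hm' : pvMarker x = false := by simpa using hm
      have hCsnoc : pvC (ys ++ [x]) = (pvC ys).map (· ++ [x]) := by
        rw [pvC, hrev, pvCr, if_neg hm,
          show ([x] : List String) = [] ++ [x] from rfl, pvCr_acc]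
        rfl
      have herr : ¬ pvErr x = true := by
        intro he; exact absurd (pvErr_marker he) (by simp [hm'])
      have hOsnoc : pvOpen (ys ++ [x]).reverse [] = pvOpen ys.reverse [] := by
        rw [hrev, pvOpen, if_neg herr,
          show ([x] : List String) = [] ++ [x] from rfl]
        exact pvOpen_acc_nonmarker ys.reverse x hm' []
      have hARsnoc : pvAR (ys ++ [x]).reverse [] =
          if pvOpen ys.reverse [] then pvAR ys.reverse [] ++ [x] else pvAR ys.reverse [] := by
        rw [hrev, pvAR, if_neg herr,
          show ([x] : List String) = [] ++ [x] from rfl]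
        exact pvAR_acc_nonmarker x hm' ys.reverse []
      cases hcv : st.2.1 with
      | none =>
        -- no marker seen yet: the state is unchanged and the flag is off
        have hstep : pvStep st x = st := by
          rw [pvStep, if_neg hm, hcv]
        have hopen : pvOpen ys.reverse [] = false := by
          rw [hc] at hcv
          exact pvOpen_all_false _ _ (pvCr_none_all _ _ hcv)
        have hf' : st.2.2 = false := hf.trans hopen
        rw [hstep]
        refine ⟨?_, ?_, ?_⟩
        · rw [hOsnoc]; exact hf
        · rw [hCsnoc, ← hc, hcv]; rfl
        · rw [hARsnoc, hopen]
          simp only [Bool.false_eq_true, if_false]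
          exact hout
      | some cur =>
        have hstep : pvStep st x = (st.1, some (cur ++ [x]), st.2.2) := by
          rw [pvStep, if_neg hm, hcv]
        rw [hstep]
        refine ⟨?_, ?_, ?_⟩
        · rw [hOsnoc]; exact hf
        · show some (cur ++ [x]) = _
          rw [hCsnoc, ← hc, hcv]; rfl
        · show (if st.2.2 = true then (some (cur ++ [x])).getD [] else st.1) = _
          rw [hARsnoc, ← hf]
          by_cases hfv : st.2.2 = true
          · rw [if_pos hfv, if_pos hfv, Option.getD_some]
            rw [if_pos hfv, hcv, Option.getD_some] at hout
            rw [hout]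
          · rw [if_neg hfv, if_neg hfv]
            rw [if_neg hfv] at hout
            exact hout

-- ===== VERDICT (by name: the statement is the Claim_ definition above) =====
theorem extract_latest_error_block_py_spec : Claim_equal_extract_latest_error_block_py := by
  intro lines _
  unfold Spec_extract_latest_error_block_py extract_latest_error_block_py
    extract_latest_error_block_py_alt
  obtain ⟨_, _, hout⟩ := pvInv lines
  rw [pvSearch_eq lines lines.length le_rfl, List.take_length, List.drop_length]
  exact hout.symm
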